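-- pv_equiv track=rewrite | github.com/ModelContextProtocol-Security/mcpserver-marketplace | security-report/tools/tier1_audit.py | security_headers_summary
-- ===== SOURCE A (Python) =====
-- def security_headers_summary(headers: dict) -> dict:
--     # Normalize keys to lowercase
--     h = {k.lower(): v for k, v in headers.items()}
--     summary = {}
--     def get(name):
--         return h.get(name.lower())
--
--     summary["strict_transport_security"] = get("strict-transport-security")
--     summary["content_security_policy"] = get("content-security-policy")
--     summary["x_frame_options"] = get("x-frame-options")
--     summary["x_content_type_options"] = get("x-content-type-options")
--     summary["referrer_policy"] = get("referrer-policy")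
--     summary["permissions_policy"] = get("permissions-policy")
--     summary["cross_origin_opener_policy"] = get("cross-origin-opener-policy")
--     summary["cross_origin_resource_policy"] = get("cross-origin-resource-policy")
--     summary["cross_origin_embedder_policy"] = get("cross-origin-embedder-policy")
--     return summary
-- ===== SOURCE B (Python) =====
-- _KEYS = [
--     ("strict-transport-security", "strict_transport_security"),
--     ("content-security-policy", "content_security_policy"),
--     ("x-frame-options", "x_frame_options"),
--     ("x-content-type-options", "x_content_type_options"),
--     ("referrer-policy", "referrer_policy"),
--     ("permissions-policy", "permissions_policy"),
--     ("cross-origin-opener-policy", "cross_origin_opener_policy"),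
--     ("cross-origin-resource-policy", "cross_origin_resource_policy"),
--     ("cross-origin-embedder-policy", "cross_origin_embedder_policy"),
-- ]
-- _REV = dict(_KEYS)
--
-- def security_headers_summary(headers: dict) -> dict:
--     summary = {out_key: None for _, out_key in _KEYS}
--     for k, v in headers.items():
--         out_key = _REV.get(k.lower())
--         if out_key is not None:
--             summary[out_key] = v
--     return summary
-- ===== Notes on version B (the rewrite author's own statement) =====
-- stated objective: alternative
-- what changed: Replaced A's full normalization of all headers into a lowercased dict followed by nine fixed lookups with a reverse table from canonical header name to output key and a single dispatching pass over the input that overwrites a pre-initialized summary (last wins).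
import Mathlib
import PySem

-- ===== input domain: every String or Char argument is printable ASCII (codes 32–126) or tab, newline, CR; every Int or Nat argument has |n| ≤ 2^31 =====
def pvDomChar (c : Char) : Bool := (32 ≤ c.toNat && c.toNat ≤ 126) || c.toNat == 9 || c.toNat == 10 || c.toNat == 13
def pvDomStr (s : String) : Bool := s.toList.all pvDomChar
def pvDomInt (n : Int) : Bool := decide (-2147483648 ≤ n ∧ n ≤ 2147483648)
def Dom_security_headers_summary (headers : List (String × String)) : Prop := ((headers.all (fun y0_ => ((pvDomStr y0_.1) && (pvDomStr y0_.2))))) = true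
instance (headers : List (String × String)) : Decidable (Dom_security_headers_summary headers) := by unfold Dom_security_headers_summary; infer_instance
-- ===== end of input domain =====

-- B replaces A's "normalize every header then 9 fixed lookups" with a reverse table and one
-- dispatching pass over the input (objective: alternative decomposition, same cost).

-- ===== PORT A =====
def security_headers_summary (headers : List (String × String)) : List (String × Option String) :=
  -- h = {k.lower(): v for k, v in headers.items()}
  let h : PySem.Dict String String :=
    headers.foldl (fun d p => d.insert (PySem.Str.lower p.1) p.2) PySem.Dict.empty
  -- get(name) = h.get(name.lower()); summary built by nine fresh-key insertions, in order
  let get := fun (name : String) => h.get? (PySem.Str.lower name)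
  [("strict_transport_security", get "strict-transport-security"),
   ("content_security_policy", get "content-security-policy"),
   ("x_frame_options", get "x-frame-options"),
   ("x_content_type_options", get "x-content-type-options"),
   ("referrer_policy", get "referrer-policy"),
   ("permissions_policy", get "permissions-policy"),
   ("cross_origin_opener_policy", get "cross-origin-opener-policy"),
   ("cross_origin_resource_policy", get "cross-origin-resource-policy"),
   ("cross_origin_embedder_policy", get "cross-origin-embedder-policy")]

-- ===== PORT B =====
-- _REV: lowercased canonical header name -> snake_case output key
def shsRev : PySem.Dict String String := PySem.Dict.ofList
  [("strict-transport-security", "strict_transport_security"),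
   ("content-security-policy", "content_security_policy"),
   ("x-frame-options", "x_frame_options"),
   ("x-content-type-options", "x_content_type_options"),
   ("referrer-policy", "referrer_policy"),
   ("permissions-policy", "permissions_policy"),
   ("cross-origin-opener-policy", "cross_origin_opener_policy"),
   ("cross-origin-resource-policy", "cross_origin_resource_policy"),
   ("cross-origin-embedder-policy", "cross_origin_embedder_policy")]

def security_headers_summary_alt (headers : List (String × String)) : List (String × Option String) :=
  -- summary = {out_key: None for each of the nine output keys}
  let init : PySem.Dict String (Option String) := PySem.Dict.ofList
    [("strict_transport_security", none),
     ("content_security_policy", none),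
     ("x_frame_options", none),
     ("x_content_type_options", none),
     ("referrer_policy", none),
     ("permissions_policy", none),
     ("cross_origin_opener_policy", none),
     ("cross_origin_resource_policy", none),
     ("cross_origin_embedder_policy", none)]
  -- single pass: dispatch each incoming header through the reverse table, last wins
  (headers.foldl (fun s p =>
      match shsRev.get? (PySem.Str.lower p.1) with
      | some ok => s.insert ok (some p.2)
      | none => s) init).items

-- ===== PRECONDITION & SPEC =====
def Spec_security_headers_summary (headers : List (String × String)) (out : List (String × Option String)) : Prop := out = security_headers_summary_alt headers
instance (headers : List (String × String)) (out : List (String × Option String)) : Decidable (Spec_security_headers_summary headers out) := by unfold Spec_security_headers_summary; infer_instance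

-- ===== CLAIM (what is proved, stated in full; the proofs are below) =====
def Claim_equal_security_headers_summary : Prop := ∀ (headers : List (String × String)), Dom_security_headers_summary headers → Spec_security_headers_summary headers (security_headers_summary headers)

-- ===== LEMMAS AND PROOFS =====

-- B's summary after any prefix, expressed through A's normalized dict d
def shsF (d : PySem.Dict String String) : PySem.Dict String (Option String) :=
  PySem.Dict.mk
    [("strict_transport_security", d.get? "strict-transport-security"),
     ("content_security_policy", d.get? "content-security-policy"),
     ("x_frame_options", d.get? "x-frame-options"),
     ("x_content_type_options", d.get? "x-content-type-options"),
     ("referrer_policy", d.get? "referrer-policy"),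
     ("permissions_policy", d.get? "permissions-policy"),
     ("cross_origin_opener_policy", d.get? "cross-origin-opener-policy"),
     ("cross_origin_resource_policy", d.get? "cross-origin-resource-policy"),
     ("cross_origin_embedder_policy", d.get? "cross-origin-embedder-policy")]

lemma shs_step (d : PySem.Dict String String) (lk v : String) :
    (match shsRev.get? lk with
     | some ok => (shsF d).insert ok (some v)
     | none => shsF d) = shsF (d.insert lk v) := by
  rcases hg : shsRev.get? lk with _ | ok
  · -- lk is not a recognized header name: both sides unchanged
    have e1 : "strict-transport-security" ≠ lk := by rintro rfl; exact absurd hg (by decide)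
    have e2 : "content-security-policy" ≠ lk := by rintro rfl; exact absurd hg (by decide)
    have e3 : "x-frame-options" ≠ lk := by rintro rfl; exact absurd hg (by decide)
    have e4 : "x-content-type-options" ≠ lk := by rintro rfl; exact absurd hg (by decide)
    have e5 : "referrer-policy" ≠ lk := by rintro rfl; exact absurd hg (by decide)
    have e6 : "permissions-policy" ≠ lk := by rintro rfl; exact absurd hg (by decide)
    have e7 : "cross-origin-opener-policy" ≠ lk := by rintro rfl; exact absurd hg (by decide)
    have e8 : "cross-origin-resource-policy" ≠ lk := by rintro rfl; exact absurd hg (by decide)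
    have e9 : "cross-origin-embedder-policy" ≠ lk := by rintro rfl; exact absurd hg (by decide)
    apply PySem.Dict.ext
    simp [shsF, PySem.Dict.get?_insert, e1, e2, e3, e4, e5, e6, e7, e8, e9]
  · -- (lk, ok) is one of the nine table entries
    have hm := PySem.Dict.mem_items_of_get?_eq_some _ hg
    rw [show shsRev.items = [("strict-transport-security", "strict_transport_security"),
      ("content-security-policy", "content_security_policy"),
      ("x-frame-options", "x_frame_options"),
      ("x-content-type-options", "x_content_type_options"),
      ("referrer-policy", "referrer_policy"),
      ("permissions-policy", "permissions_policy"),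
      ("cross-origin-opener-policy", "cross_origin_opener_policy"),
      ("cross-origin-resource-policy", "cross_origin_resource_policy"),
      ("cross-origin-embedder-policy", "cross_origin_embedder_policy")] from rfl] at hm
    simp only [List.mem_cons, List.not_mem_nil, or_false, Prod.mk.injEq] at hm
    rcases hm with ⟨rfl, rfl⟩ | ⟨rfl, rfl⟩ | ⟨rfl, rfl⟩ | ⟨rfl, rfl⟩ | ⟨rfl, rfl⟩ |
      ⟨rfl, rfl⟩ | ⟨rfl, rfl⟩ | ⟨rfl, rfl⟩ | ⟨rfl, rfl⟩ <;>
    · apply PySem.Dict.ext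
      simp [shsF, PySem.Dict.items_insert, PySem.Dict.contains, PySem.Dict.get?_insert]

lemma shs_fold (hs : List (String × String)) (d : PySem.Dict String String) :
    hs.foldl (fun s p =>
        match shsRev.get? (PySem.Str.lower p.1) with
        | some ok => s.insert ok (some p.2)
        | none => s) (shsF d)
    = shsF (hs.foldl (fun d p => d.insert (PySem.Str.lower p.1) p.2) d) := by
  induction hs generalizing d with
  | nil => rfl
  | cons p t ih => simp only [List.foldl_cons, shs_step]; exact ih _

-- ===== VERDICT (by name: the statement is the Claim_ definition above) =====
theorem security_headers_summary_spec : Claim_equal_security_headers_summary := by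
  intro headers _
  show _ = security_headers_summary_alt headers
  simp only [security_headers_summary, security_headers_summary_alt]
  rw [show (PySem.Dict.ofList
    [("strict_transport_security", (none : Option String)),
     ("content_security_policy", none),
     ("x_frame_options", none),
     ("x_content_type_options", none),
     ("referrer_policy", none),
     ("permissions_policy", none),
     ("cross_origin_opener_policy", none),
     ("cross_origin_resource_policy", none),
     ("cross_origin_embedder_policy", none)] : PySem.Dict String (Option String))
    = shsF PySem.Dict.empty from rfl]
  rw [shs_fold]
  rfl
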